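-- pv_equiv track=rewrite | github.com/Vinodkumar-yerraballi/Flask | Opps/array.py | array_to_char
-- ===== SOURCE A (Python) =====
-- from collections import deque
--
-- def array_to_char(array):
--     result=deque(maxlen=5)
--     output=[]
--     for element in array:
--         if element in result:
--             result.remove(element)
--         result.append(element)
--         output=list(result)
--     return '-'.join(output)
-- ===== SOURCE B (Python) =====
-- def array_to_char(array):
--     # Scan from the end, collecting the last 5 distinct values (ordered by
--     # last occurrence); stop as soon as 5 are found.
--     picked = []
--     for element in reversed(array):
--         if element not in picked:
--             picked.append(element)
--             if len(picked) == 5: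
--                 break
--     return '-'.join(reversed(picked))
-- ===== Notes on version B (the rewrite author's own statement) =====
-- stated objective: alternative
-- what changed: A simulates an LRU deque of capacity 5 over the whole list (membership test, remove, append, evict, plus copying the deque into a list on every iteration); B makes one backward scan collecting the last 5 distinct values and stops as soon as 5 are found.
import Mathlib
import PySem

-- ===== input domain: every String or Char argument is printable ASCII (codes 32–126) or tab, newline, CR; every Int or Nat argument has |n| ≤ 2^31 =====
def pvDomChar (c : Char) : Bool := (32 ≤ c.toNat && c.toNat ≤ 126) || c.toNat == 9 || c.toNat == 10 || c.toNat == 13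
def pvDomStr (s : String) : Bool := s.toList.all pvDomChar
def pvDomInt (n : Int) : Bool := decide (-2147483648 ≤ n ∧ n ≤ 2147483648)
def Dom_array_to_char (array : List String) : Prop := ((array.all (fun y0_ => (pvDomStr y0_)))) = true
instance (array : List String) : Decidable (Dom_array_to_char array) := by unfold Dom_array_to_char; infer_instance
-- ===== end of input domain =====

-- B replaces A's forward LRU-deque simulation by a single backward scan that
-- collects the last 5 distinct values and stops early (objective: alternative).

-- ===== PORT A =====
-- one loop step: 'if element in result: result.remove(element); result.append(element)'
-- (deque(maxlen=5) evicts from the left on append when full; 'remove' = erase first occurrence)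
def aStep (d : List String) (x : String) : List String :=
  let d1 := if x ∈ d then d.erase x else d
  let d2 := d1 ++ [x]
  if 5 < d2.length then d2.drop 1 else d2

def array_to_char (array : List String) : String :=
  let st := array.foldl (fun (p : List String × List String) x =>
    let d := aStep p.1 x
    (d, d)) ([], [])          -- (result, output); 'output = list(result)' each iteration
  PySem.Str.join "-" st.2

-- ===== PORT B =====
-- backward scan, collect distinct values until 5 are found ('break')
def bLoop : List String → List String → List String
  | [], picked => picked
  | x :: rest, picked =>
    if x ∈ picked then bLoop rest picked
    else
      let picked' := picked ++ [x]
      if picked'.length = 5 then picked' else bLoop rest picked'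

def array_to_char_alt (array : List String) : String :=
  PySem.Str.join "-" (bLoop array.reverse []).reverse

-- ===== PRECONDITION & SPEC =====
def Spec_array_to_char (array : List String) (out : String) : Prop := out = array_to_char_alt array
instance (array : List String) (out : String) : Decidable (Spec_array_to_char array out) := by unfold Spec_array_to_char; infer_instance

-- ===== CLAIM (what is proved, stated in full; the proofs are below) =====
def Claim_equal_array_to_char : Prop := ∀ (array : List String), Dom_array_to_char array → Spec_array_to_char array (array_to_char array)

-- ===== LEMMAS AND PROOFS =====

-- dedup keeping first occurrences
def dedupF : List String → List String
  | [] => []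
  | x :: r => x :: (dedupF r).filter (· ≠ x)

theorem dedupF_nodup (r : List String) : (dedupF r).Nodup := by
  induction r with
  | nil => simp [dedupF]
  | cons x r ih =>
    simp only [dedupF, List.nodup_cons]
    exact ⟨by simp, ih.filter _⟩

-- generic take/filter facts
theorem take_filter_of_mem {x : String} {l : List String} (n : Nat)
    (hnd : l.Nodup) (hx : x ∈ l.take (n+1)) :
    (l.take (n+1)).filter (· ≠ x) = (l.filter (· ≠ x)).take n := by
  induction l generalizing n with
  | nil => simp at hx
  | cons y t ih =>
    rcases List.nodup_cons.mp hnd with ⟨hy, hnd'⟩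
    by_cases h : y = x
    · rw [h] at hy
      have h1 : t.filter (· ≠ x) = t := List.filter_eq_self.mpr (by
        intro a ha; simp; rintro rfl; exact hy ha)
      have h2 : (t.take n).filter (· ≠ x) = t.take n := List.filter_eq_self.mpr (by
        intro a ha; simp; rintro rfl; exact hy (List.mem_of_mem_take ha))
      rw [h, List.take_succ_cons, List.filter_cons, List.filter_cons]
      simp only [h2, h1]
      simp
    · have hx' : x ∈ t.take n := by
        simp [List.take_succ_cons] at hx
        rcases hx with rfl | hx
        · exact absurd rfl h
        · exact hx
      cases n with
      | zero => simp at hx'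
      | succ m =>
        rw [List.take_succ_cons, List.filter_cons, List.filter_cons, ih m hnd' hx']
        simp [h]

theorem take_filter_of_not_mem {x : String} {l : List String} {n : Nat}
    (hx : x ∉ l.take (n+1)) :
    (l.filter (· ≠ x)).take n = l.take n := by
  induction l generalizing n with
  | nil => simp
  | cons y t ih =>
    have hyx : y ≠ x := by
      intro h; exact hx (by simp [List.take_succ_cons, h])
    cases n with
    | zero => simp
    | succ m =>
      have hx' : x ∉ t.take (m+1) := by
        intro h; exact hx (by simp [List.take_succ_cons]; right; exact h)
      have hyx' : (decide (y ≠ x)) = true := by simp [hyx]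
      rw [List.filter_cons, if_pos hyx', List.take_succ_cons, List.take_succ_cons, ih hx']

-- A's deque after the whole input = (first 5 of dedupF of the reversed input), reversed
theorem aFold_eq (r : List String) :
    r.reverse.foldl aStep [] = ((dedupF r).take 5).reverse := by
  induction r with
  | nil => simp [dedupF]
  | cons x r ih =>
    have hnd := dedupF_nodup r
    rw [List.reverse_cons, List.foldl_append, ih]
    simp only [List.foldl_cons, List.foldl_nil, dedupF]
    set L := dedupF r with hL
    by_cases hmem : x ∈ L.take 5
    · -- x is in the deque: remove it, append; no eviction
      have hx : x ∈ ((L.take 5).reverse : List String) := by simpa using hmem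
      have hnd5 : ((L.take 5).reverse).Nodup :=
        List.nodup_reverse.mpr ((List.take_sublist _ _).nodup hnd)
      have herase : ((L.take 5).reverse).erase x = ((L.take 5).reverse).filter (· ≠ x) := by
        rw [hnd5.erase_eq_filter]
        apply List.filter_congr
        intro a _
        by_cases hax : a = x <;> simp [hax]
      have hcomm : (L.take 5).filter (· ≠ x) = (L.filter (· ≠ x)).take 4 :=
        take_filter_of_mem 4 hnd hmem
      have hlen : (((L.take 5).reverse).filter (· ≠ x)).length ≤ 4 := by
        rw [List.filter_reverse, List.length_reverse, hcomm]
        exact (List.length_take_le _ _)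
      simp only [aStep, if_pos hx, herase]
      rw [if_neg (by simp only [List.length_append, List.length_cons, List.length_nil]; omega)]
      rw [List.filter_reverse, hcomm, List.take_succ_cons, List.reverse_cons]
    · -- x not in the deque: append, evict from the left if full
      have hx : x ∉ ((L.take 5).reverse : List String) := by simpa using hmem
      simp only [aStep, if_neg hx]
      by_cases hfull : 5 ≤ L.length
      · -- deque is full: drop the oldest
        have hlen5 : (L.take 5).length = 5 := by simp [hfull]
        rw [if_pos (by simp [hlen5])]
        have h4 : (L.filter (· ≠ x)).take 4 = L.take 4 := take_filter_of_not_mem hmem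
        rw [List.drop_append_of_le_length (by simp [hlen5]), List.drop_reverse]
        rw [List.take_succ_cons, List.reverse_cons, h4]
        congr 2
        rw [List.take_take]
        congr 1
        omega
      · -- deque holds everything: no eviction
        have htk : L.take 5 = L := List.take_of_length_le (by omega)
        have hxL : x ∉ L := by rw [← htk] at *; exact fun h => hmem (by simpa [htk] using h)
        have hfilter : L.filter (· ≠ x) = L := List.filter_eq_self.mpr (by
          intro a ha; simp; rintro rfl; exact hxL ha)
        rw [if_neg (by simp [htk]; omega)]
        rw [hfilter, htk]
        rw [List.take_of_length_le (by simp; omega)]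
        simp

-- A's (result, output) pair keeps both components equal
theorem pair_fold (xs : List String) (d : List String) :
    xs.foldl (fun (p : List String × List String) x =>
      let d := aStep p.1 x; (d, d)) (d, d) = (xs.foldl aStep d, xs.foldl aStep d) := by
  induction xs generalizing d with
  | nil => rfl
  | cons x xs ih => simpa using ih (aStep d x)

-- B's loop = first 5 of dedupF, generalized over the accumulator
theorem bLoop_eq (r picked : List String) (hlt : picked.length < 5) :
    bLoop r picked = picked ++ ((dedupF r).filter (fun a => a ∉ picked)).take (5 - picked.length) := by
  induction r generalizing picked with
  | nil => simp [bLoop, dedupF]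
  | cons x r ih =>
    by_cases hx : x ∈ picked
    · simp only [bLoop, if_pos hx, dedupF, List.filter_cons]
      rw [if_neg (by simp [hx])]
      rw [ih picked hlt]
      congr 2
      rw [List.filter_filter]
      apply List.filter_congr
      intro a _
      by_cases hax : a = x <;> simp [hax, hx]
    · have hxd : (decide (x ∉ picked)) = true := by simp [hx]
      simp only [bLoop, if_neg hx, dedupF, List.filter_cons, hxd, if_true]
      have hsplit : 5 - picked.length = (5 - (picked.length + 1)) + 1 := by omega
      by_cases hbreak : picked.length + 1 = 5
      · rw [if_pos (show (picked ++ [x]).length = 5 by simp [hbreak])]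
        rw [hsplit]
        simp [List.take_succ_cons, show 5 - (picked.length + 1) = 0 by omega]
      · rw [if_neg (show ¬ (picked ++ [x]).length = 5 by simp; omega)]
        rw [ih (picked ++ [x]) (by simp; omega)]
        rw [hsplit, List.take_succ_cons, List.filter_filter]
        have hpred : (fun a => decide (a ∉ picked ++ [x])) = (fun a => decide (a ∉ picked) && decide (a ≠ x)) := by
          funext a
          by_cases hax : a = x <;> by_cases hap : a ∈ picked <;> simp [hax, hap, hx]
        simp only [List.append_assoc, List.singleton_append, List.length_append,
          List.length_cons, List.length_nil, hpred]

-- ===== VERDICT (by name: the statement is the Claim_ definition above) =====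
theorem array_to_char_spec : Claim_equal_array_to_char := by
  intro array _
  unfold Spec_array_to_char array_to_char array_to_char_alt
  simp only [pair_fold]
  have hA : array.foldl aStep [] = ((dedupF array.reverse).take 5).reverse := by
    have := aFold_eq array.reverse
    simpa using this
  have hB : bLoop array.reverse [] = ((dedupF array.reverse).take 5) := by
    rw [bLoop_eq _ _ (by simp)]
    have : (dedupF array.reverse).filter (fun a => a ∉ ([] : List String)) = dedupF array.reverse :=
      List.filter_eq_self.mpr (fun a _ => by simp)
    rw [this]
    simp
  rw [hA, hB]
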